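-- pv_equiv track=rewrite | github.com/DaniilAY/Daily-Programmer-solutions | progressiveTaxation.py | addThreholds
-- ===== SOURCE A (Python) =====
-- def addThreholds(taxRate):
--     """
--     taxRate is a List of Lists.
--     Each list holds income cap and marginal tax rate.
--     Each theshhold is represented as List within taxRate
--
--     What this function does is add the total tax accrued through the previous
--     tax tiers.
--     """
--     taxSum = 0
--     taxRate[0].append(taxSum)
--
--     n = len(taxRate)
--     for i in range(1,n):
--         if i < 2:
--             low = 0
--         else:
--             low = taxRate[i-2][0]
--         high = taxRate[i-1][0]
--         bracket = high - low
--         taxSum += bracket*taxRate[i-1][1]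
--         taxRate[i].append(taxSum)
--
--     return taxRate
-- ===== SOURCE B (Python) =====
-- def addThreholds(taxRate):
--     # Same in-place mutation as A; each row i gets its cumulative prior-tier tax appended,
--     # but recomputed from scratch by a nested sum instead of a running accumulator.
--     taxRate[0].append(0)
--     for i in range(1, len(taxRate)):
--         total = sum((taxRate[j - 1][0] - (taxRate[j - 2][0] if j >= 2 else 0)) * taxRate[j - 1][1]
--                     for j in range(1, i + 1))
--         taxRate[i].append(total)
--     return taxRate
-- ===== Notes on version B (the rewrite author's own statement) =====
-- stated objective: alternative
-- what changed: A's single pass with a running accumulator (taxSum carried across iterations, with an i<2 branch) is replaced by a nested recomputation: each row's cumulative tax is computed from scratch by an inner sum over all prior tiers, so no state is carried between outer iterations.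
import Mathlib
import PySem

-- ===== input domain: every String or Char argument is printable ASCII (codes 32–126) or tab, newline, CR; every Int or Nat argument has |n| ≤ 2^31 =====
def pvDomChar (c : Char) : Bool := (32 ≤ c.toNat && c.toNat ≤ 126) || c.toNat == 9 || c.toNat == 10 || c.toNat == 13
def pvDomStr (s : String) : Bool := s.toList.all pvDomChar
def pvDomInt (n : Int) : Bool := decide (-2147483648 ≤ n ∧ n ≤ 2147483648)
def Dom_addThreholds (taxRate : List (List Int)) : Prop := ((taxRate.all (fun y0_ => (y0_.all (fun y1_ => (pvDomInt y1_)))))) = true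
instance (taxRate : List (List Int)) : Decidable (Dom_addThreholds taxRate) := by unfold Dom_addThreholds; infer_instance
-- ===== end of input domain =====

-- B replaces A's running accumulator (taxSum carried across the loop) by a nested
-- recomputation: every row's cumulative prior-tier tax is summed from scratch over all
-- earlier tiers (objective: alternative; B is O(n^2) where A is O(n)).
-- Both programs mutate taxRate's rows in place in Python; the equivalence proved here is
-- about the returned value (B performs the same mutation).

-- ===== PORT A =====
-- Indexing (taxRate[0], taxRate[i], taxRate[i-1][0/1], taxRate[i-2][0]) is in range under
-- Pre_addThreholds, so getD with a default is exact there (Python raises outside Pre_).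
def addThreholds (taxRate : List (List Int)) : List (List Int) :=
  -- taxSum = 0; taxRate[0].append(taxSum)
  let t := taxRate.set 0 (taxRate.getD 0 [] ++ [(0 : Int)])
  -- for i in range(1, n): …
  ((List.range' 1 (taxRate.length - 1)).foldl
    (fun (st : Int × List (List Int)) (i : Nat) =>
      let low : Int := if i < 2 then 0 else ((st.2.getD (i - 2) []).getD 0 0)
      let high : Int := (st.2.getD (i - 1) []).getD 0 0
      let bracket : Int := high - low
      let taxSum : Int := st.1 + bracket * ((st.2.getD (i - 1) []).getD 1 0)
      (taxSum, st.2.set i (st.2.getD i [] ++ [taxSum])))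
    ((0 : Int), t)).2

-- ===== PORT B =====
-- Port of Source B: indexing is in range under Pre_addThreholds, so getD is exact there.
def addThreholds_alt (taxRate : List (List Int)) : List (List Int) :=
  -- taxRate[0].append(0)
  let t := taxRate.set 0 (taxRate.getD 0 [] ++ [(0 : Int)])
  -- for i in range(1, len(taxRate)): total = sum(… for j in range(1, i+1)); taxRate[i].append(total)
  (List.range' 1 (taxRate.length - 1)).foldl
    (fun (acc : List (List Int)) (i : Nat) =>
      let total : Int := (List.range' 1 i).foldl
        (fun (s : Int) (j : Nat) =>
          s + ((acc.getD (j - 1) []).getD 0 0 -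
                (if 2 ≤ j then (acc.getD (j - 2) []).getD 0 0 else 0)) *
              ((acc.getD (j - 1) []).getD 1 0)) 0
      acc.set i (acc.getD i [] ++ [total])) t

-- ===== PRECONDITION & SPEC =====
-- Pre_ excludes exactly the inputs on which A raises IndexError: the empty list, and inputs
-- where some row other than the last is empty (its read of column 0 or 1 then fails).
def Pre_addThreholds (taxRate : List (List Int)) : Prop :=
  taxRate ≠ [] ∧ ∀ row ∈ taxRate.dropLast, row ≠ []
instance (taxRate : List (List Int)) : Decidable (Pre_addThreholds taxRate) := by
  unfold Pre_addThreholds; infer_instance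
def pvWitness_addThreholds : List (List Int) := [[10, 2], [20, 3], [50, 4]]

def Spec_addThreholds (taxRate : List (List Int)) (out : List (List Int)) : Prop := out = addThreholds_alt taxRate
instance (taxRate : List (List Int)) (out : List (List Int)) : Decidable (Spec_addThreholds taxRate out) := by unfold Spec_addThreholds; infer_instance

-- ===== CLAIM (what is proved, stated in full; the proofs are below) =====
def Claim_equal_addThreholds : Prop := ∀ (taxRate : List (List Int)), Dom_addThreholds taxRate → Pre_addThreholds taxRate → Spec_addThreholds taxRate (addThreholds taxRate)

-- ===== LEMMAS AND PROOFS =====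

-- row j of the input (out-of-range reads give [])
def pvRow (tr : List (List Int)) (j : Nat) : List Int := tr.getD j []
-- column c of row j as both programs read it, AFTER the value s was appended to the row
def pvF (tr : List (List Int)) (j c : Nat) (s : Int) : Int := (pvRow tr j ++ [s]).getD c 0
-- cumulative tax appended to row k (all reads happen after the earlier rows' appends)
def pvSum (tr : List (List Int)) : Nat → Int
  | 0 => 0
  | k + 1 =>
    pvSum tr k +
      (pvF tr k 0 (pvSum tr k) -
        (if k = 0 then 0 else pvF tr (k - 1) 0 (pvSum tr (k - 1)))) *
      pvF tr k 1 (pvSum tr k)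
-- the list after rows 0..k have received their appended cumulative sums
def pvApp (tr : List (List Int)) (k : Nat) : List (List Int) :=
  tr.mapIdx (fun j row => if j ≤ k then row ++ [pvSum tr j] else row)

theorem pvApp_getD_le (tr : List (List Int)) (k j : Nat) (hj : j < tr.length) (h : j ≤ k) :
    (pvApp tr k).getD j [] = pvRow tr j ++ [pvSum tr j] := by
  simp [pvApp, pvRow, List.getD_eq_getElem?_getD, List.getElem?_mapIdx, List.getElem?_eq_getElem hj, h]

theorem pvApp_getD_gt (tr : List (List Int)) (k j : Nat) (h : k < j) :
    (pvApp tr k).getD j [] = pvRow tr j := by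
  simp [pvApp, pvRow, List.getD_eq_getElem?_getD, List.getElem?_mapIdx, Nat.not_le.mpr h]

theorem pvApp_zero (tr : List (List Int)) (h : tr ≠ []) :
    tr.set 0 (tr.getD 0 [] ++ [(0 : Int)]) = pvApp tr 0 := by
  apply List.ext_getElem
  · simp [pvApp]
  · intro i hi hi'
    rcases Nat.eq_zero_or_pos i with rfl | hpos
    · have h0 : 0 < tr.length := List.length_pos_of_ne_nil h
      simp [pvApp, List.getD_eq_getElem?_getD, List.getElem?_eq_getElem h0, pvSum]
    · simp [pvApp, List.getElem_set, Nat.pos_iff_ne_zero.mp hpos]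
      omega

theorem pvApp_set (tr : List (List Int)) (k : Nat) (hk : k + 1 < tr.length) :
    (pvApp tr k).set (k + 1) (pvRow tr (k + 1) ++ [pvSum tr (k + 1)]) = pvApp tr (k + 1) := by
  apply List.ext_getElem
  · simp [pvApp]
  · intro i hi hi'
    by_cases hik : i = k + 1
    · subst hik
      simp [pvApp, pvRow, List.getD_eq_getElem?_getD, List.getElem?_eq_getElem hk]
    · have hle : i ≤ k ↔ i ≤ k + 1 := by omega
      simp only [pvApp, List.getElem_set, List.getElem_mapIdx, hle]
      rw [if_neg (by omega : ¬ k + 1 = i)]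

-- any read of an already-appended row (j ≤ k) is pvF exactly
theorem pvSum_succ (tr : List (List Int)) (k : Nat) :
    pvSum tr (k + 1) = pvSum tr k +
      (pvF tr k 0 (pvSum tr k) -
        (if k = 0 then 0 else pvF tr (k - 1) 0 (pvSum tr (k - 1)))) *
      pvF tr k 1 (pvSum tr k) := by
  rw [pvSum]

theorem pvApp_read (tr : List (List Int)) (k j : Nat) (hj : j < tr.length) (hjk : j ≤ k)
    (c : Nat) : ((pvApp tr k).getD j []).getD c 0 = pvF tr j c (pvSum tr j) := by
  rw [pvApp_getD_le tr k j hj hjk]; rfl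

-- step function of A's loop (proof-side name; the port is literally this fold)
def pvStepA : Int × List (List Int) → Nat → Int × List (List Int) := fun st i =>
  let low : Int := if i < 2 then 0 else ((st.2.getD (i - 2) []).getD 0 0)
  let high : Int := (st.2.getD (i - 1) []).getD 0 0
  let bracket : Int := high - low
  let taxSum : Int := st.1 + bracket * ((st.2.getD (i - 1) []).getD 1 0)
  (taxSum, st.2.set i (st.2.getD i [] ++ [taxSum]))

theorem pvA_inv (tr : List (List Int)) :
    ∀ k, k + 1 ≤ tr.length →
      (List.range' 1 k).foldl pvStepA ((0 : Int), pvApp tr 0) = (pvSum tr k, pvApp tr k) := by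
  intro k hk
  induction k with
  | zero => simp [pvSum]
  | succ k ih =>
    rw [List.range'_concat, List.foldl_append, ih (by omega)]
    simp only [one_mul, List.foldl_cons, List.foldl_nil]
    show pvStepA (pvSum tr k, pvApp tr k) (1 + k) = _
    have hrd0 : ((pvApp tr k).getD (1 + k - 1) []).getD 0 0 = pvF tr k 0 (pvSum tr k) := by
      simpa using pvApp_read tr k (1 + k - 1) (by omega) (by omega) 0
    have hrd1 : ((pvApp tr k).getD (1 + k - 1) []).getD 1 0 = pvF tr k 1 (pvSum tr k) := by
      simpa using pvApp_read tr k (1 + k - 1) (by omega) (by omega) 1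
    have hlow : (if 1 + k < 2 then (0 : Int)
        else ((pvApp tr k).getD (1 + k - 2) []).getD 0 0)
        = (if k = 0 then 0 else pvF tr (k - 1) 0 (pvSum tr (k - 1))) := by
      rcases Nat.eq_zero_or_pos k with rfl | hkpos
      · simp
      · rw [if_neg (by omega), if_neg (by omega)]
        have := pvApp_read tr k (1 + k - 2) (by omega) (by omega) 0
        simpa [show 1 + k - 2 = k - 1 by omega] using this
    simp only [pvStepA, hrd0, hrd1, hlow]
    have hgt : (pvApp tr k).getD (1 + k) [] = pvRow tr (1 + k) :=
      pvApp_getD_gt tr k (1 + k) (by omega)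
    simp only [hgt]
    rw [show 1 + k = k + 1 by omega, ← pvSum_succ tr k, pvApp_set tr k hk]

-- step function of B's outer loop (proof-side name; the port is literally this fold)
def pvStepB : List (List Int) → Nat → List (List Int) := fun acc i =>
  let total : Int := (List.range' 1 i).foldl
    (fun (s : Int) (j : Nat) =>
      s + ((acc.getD (j - 1) []).getD 0 0 -
            (if 2 ≤ j then (acc.getD (j - 2) []).getD 0 0 else 0)) *
          ((acc.getD (j - 1) []).getD 1 0)) 0
  acc.set i (acc.getD i [] ++ [total])

-- B's inner sum over tiers 1..m, read from the state after rows 0..k were appended,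
-- recomputes pvSum m (every row it reads is ≤ k, already appended)
theorem pvB_inner (tr : List (List Int)) (k : Nat) (hk : k < tr.length) :
    ∀ m, m ≤ k + 1 →
      (List.range' 1 m).foldl
        (fun (s : Int) (j : Nat) =>
          s + (((pvApp tr k).getD (j - 1) []).getD 0 0 -
                (if 2 ≤ j then ((pvApp tr k).getD (j - 2) []).getD 0 0 else 0)) *
              (((pvApp tr k).getD (j - 1) []).getD 1 0)) 0 = pvSum tr m := by
  intro m hm
  induction m with
  | zero => simp [pvSum]
  | succ m ih =>
    rw [List.range'_concat, List.foldl_append, ih (by omega)]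
    simp only [one_mul, List.foldl_cons, List.foldl_nil]
    have hrd0 : ((pvApp tr k).getD (1 + m - 1) []).getD 0 0 = pvF tr m 0 (pvSum tr m) := by
      simpa using pvApp_read tr k (1 + m - 1) (by omega) (by omega) 0
    have hrd1 : ((pvApp tr k).getD (1 + m - 1) []).getD 1 0 = pvF tr m 1 (pvSum tr m) := by
      simpa using pvApp_read tr k (1 + m - 1) (by omega) (by omega) 1
    have hlow : (if 2 ≤ 1 + m then ((pvApp tr k).getD (1 + m - 2) []).getD 0 0 else (0 : Int))
        = (if m = 0 then 0 else pvF tr (m - 1) 0 (pvSum tr (m - 1))) := by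
      rcases Nat.eq_zero_or_pos m with rfl | hmpos
      · simp
      · rw [if_pos (by omega), if_neg (by omega)]
        have := pvApp_read tr k (1 + m - 2) (by omega) (by omega) 0
        simpa [show 1 + m - 2 = m - 1 by omega] using this
    rw [hrd0, hrd1, hlow, ← pvSum_succ tr m]

theorem pvB_inv (tr : List (List Int)) :
    ∀ k, k + 1 ≤ tr.length →
      (List.range' 1 k).foldl pvStepB (pvApp tr 0) = pvApp tr k := by
  intro k hk
  induction k with
  | zero => simp
  | succ k ih =>
    rw [List.range'_concat, List.foldl_append, ih (by omega)]
    simp only [one_mul, List.foldl_cons, List.foldl_nil]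
    show pvStepB (pvApp tr k) (1 + k) = _
    unfold pvStepB
    rw [pvB_inner tr k (by omega) (1 + k) (by omega)]
    rw [pvApp_getD_gt tr k (1 + k) (by omega)]
    rw [show 1 + k = k + 1 by omega, pvApp_set tr k hk]

-- ===== VERDICT (by name: the statement is the Claim_ definition above) =====
theorem addThreholds_spec : Claim_equal_addThreholds := by
  intro tr _ hpre
  obtain ⟨hne, -⟩ := hpre
  unfold Spec_addThreholds
  have hlen : 1 ≤ tr.length := List.length_pos_of_ne_nil hne
  have ht : tr.set 0 (tr.getD 0 [] ++ [(0 : Int)]) = pvApp tr 0 := pvApp_zero tr hne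
  have hA : addThreholds tr
      = ((List.range' 1 (tr.length - 1)).foldl pvStepA ((0 : Int), pvApp tr 0)).2 := by
    show ((List.range' 1 (tr.length - 1)).foldl pvStepA
      ((0 : Int), tr.set 0 (tr.getD 0 [] ++ [(0 : Int)]))).2 = _
    rw [ht]
  have hB : addThreholds_alt tr
      = (List.range' 1 (tr.length - 1)).foldl pvStepB (pvApp tr 0) := by
    show (List.range' 1 (tr.length - 1)).foldl pvStepB
      (tr.set 0 (tr.getD 0 [] ++ [(0 : Int)])) = _
    rw [ht]
  rw [hA, hB, pvA_inv tr (tr.length - 1) (by omega), pvB_inv tr (tr.length - 1) (by omega)]
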